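-- pv_equiv track=rewrite | github.com/alexmassen-hane/advent-of-code-2024 | Day 4/part1_hard_and_dumb_way.py | diagonalize_matrix
-- ===== SOURCE A (Python) =====
-- def diagonalize_matrix(data, select):
--
--     n_rows = len(data)
--     n_cols = len(data[0])
--
--     size = n_cols + n_rows - 1
--     output = [["*" for _ in range(size)] for _ in range(size)]
--
--     if select == "right":
--         for i in range(n_rows):
--             for j in range(n_cols):
--                 output[i + j][j] = data[i][j]
--
--     if select == "left":
--         for i in range(n_rows):
--             for j in range(n_cols):
--                 output[i + (n_cols - j - 1)][j + n_rows - 1] = data[i][j]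
--
--     return output
-- ===== SOURCE B (Python) =====
-- def diagonalize_matrix(data, select):
--     n_rows = len(data)
--     n_cols = len(data[0])
--     size = n_cols + n_rows - 1
--     if select == "right":
--         return [[data[r - c][c] if 0 <= c < n_cols and 0 <= r - c < n_rows else "*"
--                  for c in range(size)] for r in range(size)]
--     if select == "left":
--         return [[data[r - (n_cols - 1) + (c - (n_rows - 1))][c - (n_rows - 1)]
--                  if 0 <= c - (n_rows - 1) < n_cols
--                  and 0 <= r - (n_cols - 1) + (c - (n_rows - 1)) < n_rows
--                  else "*"
--                  for c in range(size)] for r in range(size)]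
--     return [["*" for _ in range(size)] for _ in range(size)]
-- ===== Notes on version B (the rewrite author's own statement) =====
-- stated objective: idiomatic
-- what changed: B builds the output by gathering: each output cell (r,c) is computed directly from the inverted index map as a nested comprehension, instead of A's allocate-a-star-grid-then-scatter double loop with in-place assignment.
import Mathlib
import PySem

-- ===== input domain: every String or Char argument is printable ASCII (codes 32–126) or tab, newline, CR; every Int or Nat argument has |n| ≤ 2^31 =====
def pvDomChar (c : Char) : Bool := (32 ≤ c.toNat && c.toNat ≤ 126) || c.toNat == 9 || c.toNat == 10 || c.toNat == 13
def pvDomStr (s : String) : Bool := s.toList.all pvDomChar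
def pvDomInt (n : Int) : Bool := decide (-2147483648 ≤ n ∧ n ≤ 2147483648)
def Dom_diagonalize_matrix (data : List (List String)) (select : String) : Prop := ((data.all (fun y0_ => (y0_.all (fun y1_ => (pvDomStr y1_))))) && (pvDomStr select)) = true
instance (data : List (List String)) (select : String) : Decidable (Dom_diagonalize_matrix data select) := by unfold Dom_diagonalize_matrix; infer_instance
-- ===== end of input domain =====

-- B rebuilds the output by gathering each cell from its unique source index (a nested
-- comprehension) instead of A's scatter (allocate a '*' grid, then assign in a double loop).

-- ===== PORT A =====
-- `output[r][c] = v` on a list-of-lists becomes a functional two-level List.set.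
def set2d (m : List (List String)) (r c : Nat) (v : String) : List (List String) :=
  m.set r ((m.getD r []).set c v)

def diagonalize_matrix (data : List (List String)) (select : String) : List (List String) :=
  let n_rows := data.length
  let n_cols := (data.headD []).length   -- data[0]; Pre_ excludes data = [] (IndexError)
  let size := n_cols + n_rows - 1
  let output := List.replicate size (List.replicate size "*")
  let output :=
    if select = "right" then
      (List.range n_rows).foldl (fun acc i =>
        (List.range n_cols).foldl (fun acc j =>
          set2d acc (i + j) j ((data.getD i []).getD j "")) acc) output
    else output
  let output :=
    if select = "left" then
      (List.range n_rows).foldl (fun acc i =>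
        (List.range n_cols).foldl (fun acc j =>
          set2d acc (i + (n_cols - j - 1)) (j + n_rows - 1) ((data.getD i []).getD j "")) acc) output
    else output
  output

-- ===== PORT B =====
-- Transliteration of Source B.  Python's int guards `0 <= e` on possibly-negative
-- expressions are encoded over Nat: `0 <= c - (n_rows-1)` becomes `n_rows - 1 ≤ c`,
-- and `0 <= r - (n_cols-1) + j` becomes `n_cols - 1 ≤ r + j`; inside those guards the
-- Nat subtractions equal the Python int values, so the encoding is exact.
def diagonalize_matrix_alt (data : List (List String)) (select : String) : List (List String) :=
  let n_rows := data.length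
  let n_cols := (data.headD []).length
  let size := n_cols + n_rows - 1
  if select = "right" then
    (List.range size).map (fun r => (List.range size).map (fun c =>
      if c < n_cols ∧ c ≤ r ∧ r - c < n_rows then (data.getD (r - c) []).getD c "" else "*"))
  else if select = "left" then
    (List.range size).map (fun r => (List.range size).map (fun c =>
      if n_rows - 1 ≤ c ∧ c - (n_rows - 1) < n_cols ∧
         n_cols - 1 ≤ r + (c - (n_rows - 1)) ∧ r + (c - (n_rows - 1)) - (n_cols - 1) < n_rows
      then (data.getD (r + (c - (n_rows - 1)) - (n_cols - 1)) []).getD (c - (n_rows - 1)) ""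
      else "*"))
  else
    (List.range size).map (fun _ => (List.range size).map (fun _ => "*"))

-- ===== PRECONDITION & SPEC =====
-- Pre_ excludes exactly the inputs where A raises IndexError: empty data (data[0]),
-- and, for select "right"/"left", a row shorter than the first row (data[i][j]).
def Pre_diagonalize_matrix (data : List (List String)) (select : String) : Prop :=
  data ≠ [] ∧ ((select = "right" ∨ select = "left") →
    ∀ row ∈ data, (data.headD []).length ≤ row.length)
instance (data : List (List String)) (select : String) : Decidable (Pre_diagonalize_matrix data select) := by unfold Pre_diagonalize_matrix; infer_instance
def pvWitness_diagonalize_matrix : List (List String) × String := ([["a","b"],["c","d"]], "right")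

def Spec_diagonalize_matrix (data : List (List String)) (select : String) (out : List (List String)) : Prop := out = diagonalize_matrix_alt data select
instance (data : List (List String)) (select : String) (out : List (List String)) : Decidable (Spec_diagonalize_matrix data select out) := by unfold Spec_diagonalize_matrix; infer_instance

-- ===== CLAIM (what is proved, stated in full; the proofs are below) =====
def Claim_equal_diagonalize_matrix : Prop := ∀ (data : List (List String)) (select : String), Dom_diagonalize_matrix data select → Pre_diagonalize_matrix data select → Spec_diagonalize_matrix data select (diagonalize_matrix data select)

-- ===== LEMMAS AND PROOFS =====

def getCell (m : List (List String)) (r c : Nat) : String := (m.getD r []).getD c "*"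

def Shape (s : Nat) (m : List (List String)) : Prop :=
  m.length = s ∧ ∀ row ∈ m, row.length = s

theorem shape_set2d {s : Nat} {m : List (List String)} (r c : Nat) (v : String)
    (h : Shape s m) : Shape s (set2d m r c v) := by
  obtain ⟨h1, h2⟩ := h
  by_cases hr : r < m.length
  · refine ⟨by simp [set2d, h1], ?_⟩
    intro row hrow
    rcases List.mem_or_eq_of_mem_set hrow with h | h
    · exact h2 _ h
    · subst h
      rw [List.getD_eq_getElem m [] hr, List.length_set]
      exact h2 _ (List.getElem_mem hr)
  · have : set2d m r c v = m := List.set_eq_of_length_le (by omega)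
    rw [this]; exact ⟨h1, h2⟩

theorem shape_replicate (s : Nat) : Shape s (List.replicate s (List.replicate s "*")) := by
  constructor
  · simp
  · intro row hrow
    simp_all [List.eq_of_mem_replicate hrow]

theorem getCell_replicate (s r c : Nat) (hr : r < s) :
    getCell (List.replicate s (List.replicate s "*")) r c = "*" := by
  simp [getCell, List.getD_eq_getElem?_getD, List.getElem?_replicate, hr]
  split <;> rfl

theorem getCell_set2d {s : Nat} {m : List (List String)} {r c : Nat} (v : String)
    (h : Shape s m) (hr : r < s) (hc : c < s) (r' c' : Nat) :
    getCell (set2d m r c v) r' c' = if r' = r ∧ c' = c then v else getCell m r' c' := by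
  obtain ⟨h1, h2⟩ := h
  have hrm : r < m.length := by omega
  have hrowlen : m[r].length = s := h2 _ (List.getElem_mem hrm)
  unfold getCell set2d
  simp only [List.getD_eq_getElem?_getD]
  by_cases hrr : r' = r
  · rw [hrr, List.getElem?_set_self hrm]
    by_cases hcc : c' = c
    · rw [hcc]
      simp [List.getElem?_eq_getElem hrm,
        List.getElem?_set_self (show c < m[r].length by omega)]
    · simp [List.getElem?_eq_getElem hrm,
        List.getElem?_set_ne (fun h => hcc h.symm), hcc]
  · rw [List.getElem?_set_ne (fun h => hrr h.symm)]
    simp [hrr]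

theorem foldl_pres {α β : Type} (P : α → Prop) (f : α → β → α) (l : List β) (a : α)
    (h : P a) (hf : ∀ a b, P a → P (f a b)) : P (l.foldl f a) := by
  induction l generalizing a with
  | nil => exact h
  | cons x xs ih => exact ih _ (hf _ _ h)

theorem shape_inner_right {s : Nat} (d : Nat → Nat → String) (i : Nat) (k : Nat)
    {acc : List (List String)} (hs : Shape s acc) :
    Shape s ((List.range k).foldl (fun a j => set2d a (i + j) j (d i j)) acc) :=
  foldl_pres _ _ _ _ hs (fun _ _ h => shape_set2d _ _ _ h)

-- effect of the inner `for j` loop of select == "right", cell by cell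
theorem inner_right {s : Nat} (d : Nat → Nat → String) (i : Nat) (n_cols : Nat)
    (hw : ∀ j, j < n_cols → i + j < s ∧ j < s) :
    ∀ (k : Nat) (acc : List (List String)), k ≤ n_cols → Shape s acc → ∀ r c,
    getCell ((List.range k).foldl (fun a j => set2d a (i + j) j (d i j)) acc) r c =
      if c < k ∧ r = i + c then d i c else getCell acc r c := by
  intro k
  induction k with
  | zero => intro acc _ _ r c; simp
  | succ k ih =>
    intro acc hk hs r c
    rw [List.range_succ, List.foldl_append, List.foldl_cons, List.foldl_nil]
    have hsf := shape_inner_right (s := s) d i k hs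
    obtain ⟨h1, h2⟩ := hw k (by omega)
    rw [getCell_set2d (d i k) hsf h1 h2 r c, ih acc (by omega) hs r c]
    by_cases h : r = i + k ∧ c = k
    · obtain ⟨hr0, hc0⟩ := h
      subst hc0; subst hr0
      rw [if_pos ⟨rfl, rfl⟩, if_pos (⟨Nat.lt_succ_self c, rfl⟩ : c < c + 1 ∧ i + c = i + c)]
    · rw [if_neg h]
      by_cases h' : c < k ∧ r = i + c
      · rw [if_pos h', if_pos (show c < k + 1 ∧ r = i + c from ⟨by omega, h'.2⟩)]
      · have hn : ¬ (c < k + 1 ∧ r = i + c) := by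
          rintro ⟨a1, a2⟩
          rcases Nat.lt_succ_iff_lt_or_eq.mp a1 with b | b
          · exact h' ⟨b, a2⟩
          · exact h ⟨by omega, b⟩
        rw [if_neg h', if_neg hn]

-- effect of the whole `for i` loop of select == "right"
theorem outer_right {s : Nat} (d : Nat → Nat → String) (n_rows n_cols : Nat)
    (hw : ∀ i j, i < n_rows → j < n_cols → i + j < s ∧ j < s) :
    ∀ (k : Nat) (acc : List (List String)), k ≤ n_rows → Shape s acc → ∀ r c,
    getCell ((List.range k).foldl (fun acc i =>
        (List.range n_cols).foldl (fun a j => set2d a (i + j) j (d i j)) acc) acc) r c =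
      if c < n_cols ∧ c ≤ r ∧ r - c < k then d (r - c) c else getCell acc r c := by
  intro k
  induction k with
  | zero => intro acc _ _ r c; simp
  | succ k ih =>
    intro acc hk hs r c
    rw [List.range_succ, List.foldl_append, List.foldl_cons, List.foldl_nil]
    have hsf : Shape s ((List.range k).foldl (fun acc i =>
        (List.range n_cols).foldl (fun a j => set2d a (i + j) j (d i j)) acc) acc) :=
      foldl_pres _ _ _ _ hs (fun a b h => shape_inner_right d b n_cols h)
    rw [inner_right d k n_cols (fun j hj => hw k j (by omega) hj) n_cols _ le_rfl hsf r c,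
        ih acc (by omega) hs r c]
    by_cases h : c < n_cols ∧ r = k + c
    · rw [if_pos h, if_pos (show c < n_cols ∧ c ≤ r ∧ r - c < k + 1 from ⟨h.1, by omega, by omega⟩),
          show r - c = k by omega]
    · rw [if_neg h]
      by_cases h' : c < n_cols ∧ c ≤ r ∧ r - c < k
      · rw [if_pos h', if_pos (show c < n_cols ∧ c ≤ r ∧ r - c < k + 1 from
          ⟨h'.1, h'.2.1, by omega⟩)]
      · have hn : ¬ (c < n_cols ∧ c ≤ r ∧ r - c < k + 1) := by
          rintro ⟨a1, a2, a3⟩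
          rcases Nat.lt_succ_iff_lt_or_eq.mp a3 with b | b
          · exact h' ⟨a1, a2, b⟩
          · exact h ⟨a1, by omega⟩
        rw [if_neg h', if_neg hn]

theorem shape_inner_left {s : Nat} (d : Nat → Nat → String) (n_rows n_cols i k : Nat)
    {acc : List (List String)} (hs : Shape s acc) :
    Shape s ((List.range k).foldl (fun a j =>
      set2d a (i + (n_cols - j - 1)) (j + n_rows - 1) (d i j)) acc) :=
  foldl_pres _ _ _ _ hs (fun _ _ h => shape_set2d _ _ _ h)

-- effect of the inner `for j` loop of select == "left", cell by cell
theorem inner_left {s : Nat} (d : Nat → Nat → String) (n_rows n_cols i : Nat)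
    (hw : ∀ j, j < n_cols → i + (n_cols - j - 1) < s ∧ j + n_rows - 1 < s) (hnr : 1 ≤ n_rows) :
    ∀ (k : Nat) (acc : List (List String)), k ≤ n_cols → Shape s acc → ∀ r c,
    getCell ((List.range k).foldl (fun a j =>
        set2d a (i + (n_cols - j - 1)) (j + n_rows - 1) (d i j)) acc) r c =
      if n_rows - 1 ≤ c ∧ c - (n_rows - 1) < k ∧ r + c = i + (n_cols - 1) + (n_rows - 1)
      then d i (c - (n_rows - 1)) else getCell acc r c := by
  intro k
  induction k with
  | zero => intro acc _ _ r c; simp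
  | succ k ih =>
    intro acc hk hs r c
    rw [List.range_succ, List.foldl_append, List.foldl_cons, List.foldl_nil]
    have hsf := shape_inner_left (s := s) d n_rows n_cols i k hs
    obtain ⟨h1, h2⟩ := hw k (by omega)
    rw [getCell_set2d (d i k) hsf h1 h2 r c, ih acc (by omega) hs r c]
    by_cases h : r = i + (n_cols - k - 1) ∧ c = k + n_rows - 1
    · obtain ⟨hr0, hc0⟩ := h
      have hcond : n_rows - 1 ≤ c ∧ c - (n_rows - 1) < k + 1 ∧
          r + c = i + (n_cols - 1) + (n_rows - 1) := by omega
      rw [if_pos ⟨hr0, hc0⟩, if_pos hcond, show c - (n_rows - 1) = k by omega]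
    · rw [if_neg h]
      by_cases h' : n_rows - 1 ≤ c ∧ c - (n_rows - 1) < k ∧
          r + c = i + (n_cols - 1) + (n_rows - 1)
      · rw [if_pos h', if_pos (show n_rows - 1 ≤ c ∧ c - (n_rows - 1) < k + 1 ∧
          r + c = i + (n_cols - 1) + (n_rows - 1) from ⟨h'.1, by omega, h'.2.2⟩)]
      · have hn : ¬ (n_rows - 1 ≤ c ∧ c - (n_rows - 1) < k + 1 ∧
            r + c = i + (n_cols - 1) + (n_rows - 1)) := by
          rintro ⟨a1, a2, a3⟩
          rcases Nat.lt_succ_iff_lt_or_eq.mp a2 with b | b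
          · exact h' ⟨a1, b, a3⟩
          · exact h ⟨by omega, by omega⟩
        rw [if_neg h', if_neg hn]

-- effect of the whole `for i` loop of select == "left"
theorem outer_left {s : Nat} (d : Nat → Nat → String) (n_rows n_cols : Nat)
    (hw : ∀ i j, i < n_rows → j < n_cols → i + (n_cols - j - 1) < s ∧ j + n_rows - 1 < s)
    (hnr : 1 ≤ n_rows) :
    ∀ (k : Nat) (acc : List (List String)), k ≤ n_rows → Shape s acc → ∀ r c,
    getCell ((List.range k).foldl (fun acc i =>
        (List.range n_cols).foldl (fun a j =>
          set2d a (i + (n_cols - j - 1)) (j + n_rows - 1) (d i j)) acc) acc) r c =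
      if n_rows - 1 ≤ c ∧ c - (n_rows - 1) < n_cols ∧
         (n_cols - 1) + (n_rows - 1) ≤ r + c ∧ r + c - (n_cols - 1) - (n_rows - 1) < k
      then d (r + c - (n_cols - 1) - (n_rows - 1)) (c - (n_rows - 1)) else getCell acc r c := by
  intro k
  induction k with
  | zero => intro acc _ _ r c; simp
  | succ k ih =>
    intro acc hk hs r c
    rw [List.range_succ, List.foldl_append, List.foldl_cons, List.foldl_nil]
    have hsf : Shape s _ :=
      foldl_pres _ _ (List.range k) acc hs
        (fun a b h => shape_inner_left d n_rows n_cols b n_cols h)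
    rw [inner_left d n_rows n_cols k (fun j hj => hw k j (by omega) hj) hnr n_cols _ le_rfl hsf r c,
        ih acc (by omega) hs r c]
    by_cases h : n_rows - 1 ≤ c ∧ c - (n_rows - 1) < n_cols ∧
        r + c = k + (n_cols - 1) + (n_rows - 1)
    · rw [if_pos h, if_pos (show n_rows - 1 ≤ c ∧ c - (n_rows - 1) < n_cols ∧
          (n_cols - 1) + (n_rows - 1) ≤ r + c ∧ r + c - (n_cols - 1) - (n_rows - 1) < k + 1 from
          ⟨h.1, h.2.1, by omega, by omega⟩),
        show r + c - (n_cols - 1) - (n_rows - 1) = k by omega]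
    · rw [if_neg h]
      by_cases h' : n_rows - 1 ≤ c ∧ c - (n_rows - 1) < n_cols ∧
          (n_cols - 1) + (n_rows - 1) ≤ r + c ∧ r + c - (n_cols - 1) - (n_rows - 1) < k
      · rw [if_pos h', if_pos (show n_rows - 1 ≤ c ∧ c - (n_rows - 1) < n_cols ∧
          (n_cols - 1) + (n_rows - 1) ≤ r + c ∧ r + c - (n_cols - 1) - (n_rows - 1) < k + 1 from
          ⟨h'.1, h'.2.1, h'.2.2.1, by omega⟩)]
      · have hn : ¬ (n_rows - 1 ≤ c ∧ c - (n_rows - 1) < n_cols ∧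
            (n_cols - 1) + (n_rows - 1) ≤ r + c ∧ r + c - (n_cols - 1) - (n_rows - 1) < k + 1) := by
          rintro ⟨a1, a2, a3, a4⟩
          rcases Nat.lt_succ_iff_lt_or_eq.mp a4 with b | b
          · exact h' ⟨a1, a2, a3, b⟩
          · exact h ⟨a1, a2, by omega⟩
        rw [if_neg h', if_neg hn]

-- assemble: a grid of known shape whose cells match a function equals the gathered grid
theorem grid_eq_of_getCell {s : Nat} (m : List (List String)) (f : Nat → Nat → String)
    (hs : Shape s m) (h : ∀ r c, r < s → c < s → getCell m r c = f r c) :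
    m = (List.range s).map (fun r => (List.range s).map (fun c => f r c)) := by
  obtain ⟨h1, h2⟩ := hs
  apply List.ext_getElem (by simpa using h1)
  intro r hr _
  have hrs : r < s := by omega
  have hrowlen : m[r].length = s := h2 _ (List.getElem_mem hr)
  simp only [List.getElem_map, List.getElem_range]
  apply List.ext_getElem (by simpa using hrowlen)
  intro c hc _
  have hcs : c < s := by omega
  have := h r c hrs hcs
  simp only [getCell, List.getD_eq_getElem m [] hr,
    List.getD_eq_getElem m[r] "*" (show c < m[r].length by omega)] at this
  simpa using this

-- ===== VERDICT (by name: the statement is the Claim_ definition above) =====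
theorem diagonalize_matrix_spec : Claim_equal_diagonalize_matrix := by
  intro data select _ hpre
  obtain ⟨hne, hrows⟩ := hpre
  unfold Spec_diagonalize_matrix diagonalize_matrix diagonalize_matrix_alt
  set n_rows := data.length with hnr
  set n_cols := (data.headD []).length with hnc
  have hnr1 : 1 ≤ n_rows := by
    cases data with
    | nil => exact absurd rfl hne
    | cons x xs => simp [hnr]
  have hs0 : Shape (n_cols + n_rows - 1)
      (List.replicate (n_cols + n_rows - 1) (List.replicate (n_cols + n_rows - 1) "*")) :=
    shape_replicate _
  by_cases hright : select = "right"
  · simp only [hright, reduceIte, show ¬("right" : String) = "left" by decide]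
    apply grid_eq_of_getCell (s := n_cols + n_rows - 1) _ _
      (foldl_pres _ _ _ _ hs0 (fun a b h => shape_inner_right (fun i j => (data.getD i []).getD j "") b n_cols h))
    intro r c hr hc
    rw [outer_right (fun i j => (data.getD i []).getD j "") n_rows n_cols
      (fun i j hi hj => ⟨by omega, by omega⟩) n_rows _ le_rfl hs0 r c]
    by_cases h : c < n_cols ∧ c ≤ r ∧ r - c < n_rows
    · rw [if_pos h, if_pos h]
    · rw [if_neg h, if_neg h, getCell_replicate _ _ _ hr]
  · by_cases hleft : select = "left"
    · simp only [hleft, reduceIte, show ¬("left" : String) = "right" by decide]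
      apply grid_eq_of_getCell (s := n_cols + n_rows - 1) _ _
        (foldl_pres _ _ _ _ hs0 (fun a b h => shape_inner_left (fun i j => (data.getD i []).getD j "") n_rows n_cols b n_cols h))
      intro r c hr hc
      rw [outer_left (fun i j => (data.getD i []).getD j "") n_rows n_cols
        (fun i j hi hj => ⟨by omega, by omega⟩) hnr1 n_rows _ le_rfl hs0 r c]
      by_cases h : n_rows - 1 ≤ c ∧ c - (n_rows - 1) < n_cols ∧
          (n_cols - 1) + (n_rows - 1) ≤ r + c ∧ r + c - (n_cols - 1) - (n_rows - 1) < n_rows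
      · have hb : n_rows - 1 ≤ c ∧ c - (n_rows - 1) < n_cols ∧
            n_cols - 1 ≤ r + (c - (n_rows - 1)) ∧
            r + (c - (n_rows - 1)) - (n_cols - 1) < n_rows :=
          ⟨h.1, h.2.1, by omega, by omega⟩
        have hidx : r + c - (n_cols - 1) - (n_rows - 1)
            = r + (c - (n_rows - 1)) - (n_cols - 1) := by omega
        rw [if_pos h, if_pos hb, hidx]
      · have hb : ¬ (n_rows - 1 ≤ c ∧ c - (n_rows - 1) < n_cols ∧
            n_cols - 1 ≤ r + (c - (n_rows - 1)) ∧
            r + (c - (n_rows - 1)) - (n_cols - 1) < n_rows) := by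
          rintro ⟨a1, a2, a3, a4⟩
          exact h ⟨a1, a2, by omega, by omega⟩
        rw [if_neg h, if_neg hb, getCell_replicate _ _ _ hr]
    · simp only [hright, hleft, reduceIte]
      rw [List.map_const', List.map_const']
      simp
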